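-- pv_equiv track=rewrite | github.com/big-ssk/CodeSignal | intro/39_Knapsack Light.py | knapsackLight
-- ===== SOURCE A (Python) =====
-- def knapsackLight(value1, weight1, value2, weight2, maxW):
--     m = [0, weight1, weight2]
--     p = [0, value1, value2]
--     n = len(m) - 1
--     f = [[0] * (maxW + 1) for i in range(n + 1)]
--     for i in range(1, n + 1):
--         for j in range(maxW + 1):
--             if j >= m[i]:
--                 f[i][j] = max(f[i - 1][j], f[i - 1][j - m[i]] + p[i])
--             else:
--                 f[i][j] = f[i - 1][j]
--     return f[n][maxW]
-- ===== SOURCE B (Python) =====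
-- def knapsackLight(value1, weight1, value2, weight2, maxW):
--     best = 0
--     if weight1 <= maxW and value1 > best:
--         best = value1
--     if weight2 <= maxW and value2 > best:
--         best = value2
--     if weight1 + weight2 <= maxW and value1 + value2 > best:
--         best = value1 + value2
--     return best
-- ===== Notes on version B (the rewrite author's own statement) =====
-- stated objective: faster
-- what changed: Replaces the O(maxW) dynamic-programming table over all capacities 0..maxW with a direct O(1) comparison of the four item subsets (none, item1, item2, both) that fit in maxW.
import Mathlib
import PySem

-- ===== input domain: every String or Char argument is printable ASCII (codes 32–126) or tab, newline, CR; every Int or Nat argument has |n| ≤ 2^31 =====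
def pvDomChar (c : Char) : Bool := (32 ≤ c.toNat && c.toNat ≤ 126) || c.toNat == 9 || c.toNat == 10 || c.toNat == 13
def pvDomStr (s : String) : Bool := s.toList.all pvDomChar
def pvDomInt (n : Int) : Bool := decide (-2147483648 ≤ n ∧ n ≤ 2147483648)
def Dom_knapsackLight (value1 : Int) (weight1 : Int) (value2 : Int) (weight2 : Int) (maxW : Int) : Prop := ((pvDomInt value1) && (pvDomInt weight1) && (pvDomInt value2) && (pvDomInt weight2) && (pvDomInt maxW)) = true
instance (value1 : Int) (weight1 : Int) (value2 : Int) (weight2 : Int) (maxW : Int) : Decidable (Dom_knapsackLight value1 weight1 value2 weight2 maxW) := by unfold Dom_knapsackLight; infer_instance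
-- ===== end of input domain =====

-- B replaces A's O(maxW) DP table with an O(1) comparison of the four item subsets that fit.


-- ===== PORT A =====
-- Python's lists are mutable arrays, so the DP table is ported with Array (in-place update);
-- xs[i] / xs[i] = v are ported by the helpers below, exact for the nonnegative in-range
-- indices A uses on every input admitted by Pre_ (where Python would raise IndexError the
-- input is excluded by Pre_, and A never uses a negative index there).
def pyAGet {α : Type} (xs : Array α) (i : Int) (d : α) : α :=
  if h : 0 ≤ i ∧ i.toNat < xs.size then xs[i.toNat] else d
def pyASet {α : Type} (xs : Array α) (i : Int) (v : α) : Array α :=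
  if 0 ≤ i then xs.setIfInBounds i.toNat v else xs
-- Python's  f[i][j] = x  (read row i, write its cell j) ported as in-place row modification.
def pyAModify {α : Type} (xs : Array α) (i : Int) (g : α → α) : Array α :=
  if 0 ≤ i then xs.modify i.toNat g else xs

-- The body of A's inner j-loop: f[i][j] = max(f[i-1][j], f[i-1][j-m[i]]+p[i]) if j >= m[i] else f[i-1][j].
def pvStep (m p : Array Int) (i : Int) (f : Array (Array Int)) (j : Int) : Array (Array Int) :=
  let prev := pyAGet f (i - 1) #[]
  let mi := pyAGet m i 0
  let x :=
    if mi ≤ j then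
      max (pyAGet prev j 0) (pyAGet prev (j - mi) 0 + pyAGet p i 0)
    else
      pyAGet prev j 0
  pyAModify f i (fun row => pyASet row j x)

-- Literal transliteration of A's nested-loop DP.
def knapsackLight (value1 : Int) (weight1 : Int) (value2 : Int) (weight2 : Int) (maxW : Int) : Int :=
  let m : Array Int := #[0, weight1, weight2]
  let p : Array Int := #[0, value1, value2]
  let n : Int := (m.size : Int) - 1
  let f : Array (Array Int) :=
    ((PySem.List.pyRange 0 (n + 1) 1).map (fun _ => Array.replicate (maxW + 1).toNat (0:Int))).toArray
  let f := (PySem.List.pyRange 1 (n + 1) 1).foldl (fun f i =>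
      (PySem.List.pyRange 0 (maxW + 1) 1).foldl (pvStep m p i) f) f
  pyAGet (pyAGet f n #[]) maxW 0

-- ===== PORT B =====
def knapsackLight_alt (value1 : Int) (weight1 : Int) (value2 : Int) (weight2 : Int) (maxW : Int) : Int :=
  let best : Int := 0
  let best := if weight1 ≤ maxW ∧ value1 > best then value1 else best
  let best := if weight2 ≤ maxW ∧ value2 > best then value2 else best
  let best := if weight1 + weight2 ≤ maxW ∧ value1 + value2 > best then value1 + value2 else best
  best

-- ===== PRECONDITION & SPEC =====
-- Pre_ excludes exactly the inputs where A raises IndexError (negative capacity or a negative weight).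
def Pre_knapsackLight (value1 : Int) (weight1 : Int) (value2 : Int) (weight2 : Int) (maxW : Int) : Prop :=
  0 ≤ weight1 ∧ 0 ≤ weight2 ∧ 0 ≤ maxW
instance (value1 : Int) (weight1 : Int) (value2 : Int) (weight2 : Int) (maxW : Int) : Decidable (Pre_knapsackLight value1 weight1 value2 weight2 maxW) := by unfold Pre_knapsackLight; infer_instance
def pvWitness_knapsackLight : Int × Int × Int × Int × Int := (10, 5, 6, 8, 10)

def Spec_knapsackLight (value1 : Int) (weight1 : Int) (value2 : Int) (weight2 : Int) (maxW : Int) (out : Int) : Prop := out = knapsackLight_alt value1 weight1 value2 weight2 maxW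
instance (value1 : Int) (weight1 : Int) (value2 : Int) (weight2 : Int) (maxW : Int) (out : Int) : Decidable (Spec_knapsackLight value1 weight1 value2 weight2 maxW out) := by unfold Spec_knapsackLight; infer_instance

-- ===== CLAIM (what is proved, stated in full; the proofs are below) =====
def Claim_equal_knapsackLight : Prop := ∀ (value1 : Int) (weight1 : Int) (value2 : Int) (weight2 : Int) (maxW : Int), Dom_knapsackLight value1 weight1 value2 weight2 maxW → Pre_knapsackLight value1 weight1 value2 weight2 maxW → Spec_knapsackLight value1 weight1 value2 weight2 maxW (knapsackLight value1 weight1 value2 weight2 maxW)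

-- ===== LEMMAS AND PROOFS =====

-- The value written into row i at column j, given the previous row.
def pvG (prev : Array Int) (w v j : Int) : Int :=
  if w ≤ j then max (pyAGet prev j 0) (pyAGet prev (j - w) 0 + v)
  else pyAGet prev j 0

-- List-level models of the array helpers (for the invariant proofs).
def pvLSet (xs : List Int) (i : Int) (v : Int) : List Int :=
  if 0 ≤ i then xs.set i.toNat v else xs
def pvLGet (xs : List Int) (i : Int) (d : Int) : Int :=
  if h : 0 ≤ i ∧ i.toNat < xs.length then xs[i.toNat] else d

theorem toList_pyASet (xs : Array Int) (i : Int) (v : Int) :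
    (pyASet xs i v).toList = pvLSet xs.toList i v := by
  unfold pyASet pvLSet
  split <;> simp

theorem pyAGet_eq_pvLGet (xs : Array Int) (i : Int) (d : Int) :
    pyAGet xs i d = pvLGet xs.toList i d := by
  unfold pyAGet pvLGet
  by_cases h : 0 ≤ i ∧ i.toNat < xs.size
  · rw [dif_pos h, dif_pos (by simpa using h)]
    simp [Array.getElem_toList]
  · rw [dif_neg h, dif_neg (by simpa using h)]

theorem pvLGet_replicate (n : Nat) (t : Int) :
    pvLGet (List.replicate n (0:Int)) t 0 = 0 := by
  unfold pvLGet
  split <;> simp_all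

theorem pvLGet_map_pyRange (G : Int → Int) (b t : Int) (h0 : 0 ≤ t) (hb : t < b) :
    pvLGet ((PySem.List.pyRange 0 b 1).map G) t 0 = G t := by
  have hlen : ((PySem.List.pyRange 0 b 1).map G).length = (b : Int).toNat := by
    simp [PySem.List.length_pyRange_one]
  have ht : t.toNat < (b:Int).toNat := by omega
  unfold pvLGet
  rw [dif_pos ⟨h0, by omega⟩]
  rw [List.getElem_map, PySem.List.getElem_pyRange_one]
  congr 1
  omega

-- The row fold transfers from arrays to lists.
theorem pvRowToList (G : Int → Int) (js : List Int) (r : Array Int) :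
    (js.foldl (fun row j => pyASet row j (G j)) r).toList
      = js.foldl (fun row j => pvLSet row j (G j)) r.toList := by
  induction js generalizing r with
  | nil => rfl
  | cons j js ih => simp only [List.foldl_cons]; rw [ih, toList_pyASet]

-- The inner j-loop fills columns 0..k-1 of a fresh row of length b with G.
theorem pvRow_inv (G : Int → Int) (b : Int) (k : Nat) (hk : (k:Int) ≤ b) :
    (PySem.List.pyRange 0 (k:Int) 1).foldl
        (fun row j => pvLSet row j (G j)) (List.replicate b.toNat 0)
      = (PySem.List.pyRange 0 (k:Int) 1).map G ++ List.replicate (b - k).toNat 0 := by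
  induction k with
  | zero => simp [PySem.List.pyRange_one_eq_nil]
  | succ k ih =>
    have hk' : (k:Int) ≤ b := by push_cast at hk ⊢; omega
    have hsplit : PySem.List.pyRange 0 ((k:Int)+1) 1 =
        PySem.List.pyRange 0 (k:Int) 1 ++ [(k:Int)] :=
      PySem.List.pyRange_one_succ_right (by positivity)
    have hrep : List.replicate (b - (k:Int)).toNat (0:Int)
        = 0 :: List.replicate (b - ((k:Int)+1)).toNat 0 := by
      have h : (b - (k:Int)).toNat = (b - ((k:Int)+1)).toNat + 1 := by push_cast at hk; omega
      rw [h, List.replicate_succ]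
    push_cast
    rw [hsplit, List.foldl_append, ih hk', List.map_append]
    simp only [List.foldl_cons, List.foldl_nil, List.map_cons, List.map_nil]
    rw [show pvLSet ((PySem.List.pyRange 0 (k:Int) 1).map G ++ List.replicate (b - (k:Int)).toNat 0)
          (k:Int) (G (k:Int))
        = ((PySem.List.pyRange 0 (k:Int) 1).map G ++ List.replicate (b - (k:Int)).toNat 0).set
            ((k:Int)).toNat (G (k:Int)) from by
      unfold pvLSet; rw [if_pos (by positivity)]]
    rw [hrep]
    rw [show ((k:Int)).toNat
        = ((PySem.List.pyRange 0 (k:Int) 1).map G).length from by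
      simp [PySem.List.length_pyRange_one]]
    rw [List.set_append_right _ _ (le_refl _)]
    simp [List.append_assoc]

theorem pvRow_full (G : Int → Int) (b : Int) (hb : 0 ≤ b) :
    (PySem.List.pyRange 0 b 1).foldl
        (fun row j => pvLSet row j (G j)) (List.replicate b.toNat 0)
      = (PySem.List.pyRange 0 b 1).map G := by
  have hb' : ((b.toNat : Int)) = b := by omega
  have h := pvRow_inv G b b.toNat (by omega)
  rw [hb'] at h
  simpa using h

theorem pyAModify_three_one (a b c : Array Int) (g : Array Int → Array Int) :
    pyAModify #[a, b, c] 1 g = #[a, g b, c] := by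
  unfold pyAModify
  rw [if_pos (by norm_num)]
  apply Array.toList_inj.mp
  rw [Array.toList_modify]
  rfl

theorem pyAModify_three_two (a b c : Array Int) (g : Array Int → Array Int) :
    pyAModify #[a, b, c] 2 g = #[a, b, g c] := by
  unfold pyAModify
  rw [if_pos (by norm_num)]
  apply Array.toList_inj.mp
  rw [Array.toList_modify]
  rfl

-- The table-level inner fold with i = 1 factors through the middle row.
theorem pvTbl1 (m p : Array Int) (js : List Int) (a b c : Array Int) :
    js.foldl (pvStep m p 1) #[a, b, c]
      = #[a, js.foldl (fun row j =>
          pyASet row j (pvG a (pyAGet m 1 0) (pyAGet p 1 0) j)) b, c] := by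
  induction js generalizing b with
  | nil => rfl
  | cons j js ih =>
    simp only [List.foldl_cons]
    rw [show pvStep m p 1 #[a, b, c] j
        = #[a, pyASet b j (pvG a (pyAGet m 1 0) (pyAGet p 1 0) j), c] from by
      unfold pvStep pvG
      rw [show ((1:Int) - 1) = (0:Int) by norm_num]
      rw [show pyAGet (#[a, b, c] : Array (Array Int)) 0 #[] = a from by simp [pyAGet]]
      rw [pyAModify_three_one]]
    exact ih _

-- The table-level inner fold with i = 2 factors through the last row.
theorem pvTbl2 (m p : Array Int) (js : List Int) (a b c : Array Int) :
    js.foldl (pvStep m p 2) #[a, b, c]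
      = #[a, b, js.foldl (fun row j =>
          pyASet row j (pvG b (pyAGet m 2 0) (pyAGet p 2 0) j)) c] := by
  induction js generalizing c with
  | nil => rfl
  | cons j js ih =>
    simp only [List.foldl_cons]
    rw [show pvStep m p 2 #[a, b, c] j
        = #[a, b, pyASet c j (pvG b (pyAGet m 2 0) (pyAGet p 2 0) j)] from by
      unfold pvStep pvG
      rw [show ((2:Int) - 1) = (1:Int) by norm_num]
      rw [show pyAGet (#[a, b, c] : Array (Array Int)) 1 #[] = b from by simp [pyAGet]]
      rw [pyAModify_three_two]]
    exact ih _

-- ===== VERDICT (by name: the statement is the Claim_ definition above) =====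
theorem knapsackLight_spec : Claim_equal_knapsackLight := by
  intro v1 w1 v2 w2 maxW _ hpre
  obtain ⟨hw1, hw2, hm⟩ := hpre
  unfold Spec_knapsackLight
  simp only [knapsackLight]
  norm_num
  have h13 : PySem.List.pyRange 1 (3:Int) 1 = [1, 2] := by decide
  have hrep3 : ∀ z : Array Int, Array.replicate (Int.toNat 3) z = #[z, z, z] := by
    intro z
    apply Array.toList_inj.mp
    simp [Array.toList_replicate, List.replicate_succ]
  rw [h13, hrep3]
  simp only [List.foldl_cons, List.foldl_nil]
  rw [pvTbl1, pvTbl2]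
  have hm1 : pyAGet (#[0, w1, w2] : Array Int) 1 0 = w1 := by simp [pyAGet]
  have hm2 : pyAGet (#[0, w1, w2] : Array Int) 2 0 = w2 := by simp [pyAGet]
  have hp1 : pyAGet (#[0, v1, v2] : Array Int) 1 0 = v1 := by simp [pyAGet]
  have hp2 : pyAGet (#[0, v1, v2] : Array Int) 2 0 = v2 := by simp [pyAGet]
  rw [hm1, hm2, hp1, hp2]
  -- row 1 as a function of j
  have hG1 : ∀ j, pvG (Array.replicate (maxW + 1).toNat 0) w1 v1 j
      = (fun j => if w1 ≤ j then max 0 (0 + v1) else 0) j := by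
    intro j
    simp only [pvG, pyAGet_eq_pvLGet, Array.toList_replicate, pvLGet_replicate]
  simp only [hG1]
  set G1 : Int → Int := fun j => if w1 ≤ j then max 0 (0 + v1) else 0 with hG1def
  set r1 : Array Int := (PySem.List.pyRange 0 (maxW + 1) 1).foldl
      (fun row j => pyASet row j (G1 j)) (Array.replicate (maxW + 1).toNat 0) with hr1
  have hr1toList : r1.toList = (PySem.List.pyRange 0 (maxW + 1) 1).map G1 := by
    rw [hr1, pvRowToList, Array.toList_replicate, pvRow_full _ _ (by omega)]
  have hr1get : ∀ t : Int, 0 ≤ t → t < maxW + 1 → pyAGet r1 t 0 = G1 t := by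
    intro t h0 hb
    rw [pyAGet_eq_pvLGet, hr1toList, pvLGet_map_pyRange _ _ _ h0 hb]
  -- row 2, read at maxW
  set r2 : Array Int := (PySem.List.pyRange 0 (maxW + 1) 1).foldl
      (fun row j => pyASet row j (pvG r1 w2 v2 j)) (Array.replicate (maxW + 1).toNat 0) with hr2
  have htbl : pyAGet (#[Array.replicate (maxW + 1).toNat 0, r1, r2] : Array (Array Int)) 2 #[]
      = r2 := by simp [pyAGet]
  rw [htbl]
  have hr2toList : r2.toList = (PySem.List.pyRange 0 (maxW + 1) 1).map (pvG r1 w2 v2) := by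
    rw [hr2, pvRowToList, Array.toList_replicate, pvRow_full _ _ (by omega)]
  rw [pyAGet_eq_pvLGet, hr2toList, pvLGet_map_pyRange _ _ _ (by omega) (by omega)]
  -- evaluate pvG r1 w2 v2 maxW and compare with B
  unfold knapsackLight_alt
  simp only [pvG]
  by_cases c2 : w2 ≤ maxW
  · rw [if_pos c2]
    rw [hr1get _ (by omega) (by omega), hr1get _ (by omega) (by omega)]
    simp only [hG1def, Int.max_def]
    split_ifs <;> omega
  · rw [if_neg c2]
    rw [hr1get _ (by omega) (by omega)]
    simp only [hG1def, Int.max_def]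
    split_ifs <;> omega
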